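-- pv_equiv track=rewrite | github.com/amitniz/ctf_challenges | csa_CTF_2021/slot_machine_reloaded/solution.py | extractRandomValue
-- ===== SOURCE A (Python) =====
-- PRINTABLE = "0123456789ABCDEFGHIJKLMNOPQRSTUVWXYZ!\"#$%&'()*+-/:.;<=>?@[]^_`{}"
--
-- def extractRandomValue(string):
--     binary_values = []
--     for c in string:
--         binary_values.append(format(PRINTABLE.index(c),'#0%db' %8)[2:])
--
--     decimal_values =[]
--     binary_192 = ''.join(binary_values)
--
--     for i in range(0,len(binary_192),32):
--         decimal_values.append(int(binary_192[i:i+32],2))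
--     return decimal_values[::-1]  #backward because I found out that that's how python creates the 192b number.
-- ===== SOURCE B (Python) =====
-- PRINTABLE = "0123456789ABCDEFGHIJKLMNOPQRSTUVWXYZ!\"#$%&'()*+-/:.;<=>?@[]^_`{}"
--
-- def extractRandomValue(string):
--     # Build one big integer (6 bits per char) instead of a binary text string.
--     M = 0
--     for c in string:
--         M = M * 64 + PRINTABLE.index(c)
--     L = 6 * len(string)
--     result = []
--     for i in range(0, L, 32):
--         width = min(32, L - i)
--         result.append((M >> (L - i - width)) & ((1 << width) - 1))
--     return result[::-1]
-- ===== Notes on version B (the rewrite author's own statement) =====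
-- stated objective: alternative
-- what changed: B replaces the intermediate binary text string (per-char format(...,'b') strings joined and re-parsed with int(...,2)) by one big integer accumulated as M = M*64 + index, extracting each 32-bit chunk (and the short final chunk) with shifts and masks.
import Mathlib
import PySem

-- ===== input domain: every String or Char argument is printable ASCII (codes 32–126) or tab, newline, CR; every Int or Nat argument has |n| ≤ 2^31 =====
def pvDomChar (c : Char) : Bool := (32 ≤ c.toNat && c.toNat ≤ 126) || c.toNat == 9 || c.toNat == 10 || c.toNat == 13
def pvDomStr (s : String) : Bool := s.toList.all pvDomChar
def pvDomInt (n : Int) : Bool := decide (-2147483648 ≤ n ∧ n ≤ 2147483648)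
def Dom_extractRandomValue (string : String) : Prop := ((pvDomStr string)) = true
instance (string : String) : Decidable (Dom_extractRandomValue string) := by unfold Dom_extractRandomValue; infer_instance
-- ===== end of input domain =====

-- B replaces A's intermediate binary text string by one big accumulated integer extracted with shifts and masks (alternative representation, same cost class).

-- ===== PORT A =====
def PRINTABLE : String := "0123456789ABCDEFGHIJKLMNOPQRSTUVWXYZ!\"#$%&'()*+-/:.;<=>?@[]^_`{}"

-- PRINTABLE.index(c): Python str.index raises ValueError when c is absent; Pre_ excludes that, so the default 0 is never used.
def pIdx (c : Char) : Int := ((PySem.List.index? PRINTABLE.toList c).getD 0 : Nat)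

-- hand port of the builtin format(n,'#08b')[2:]: 6-bit zero-padded binary; exact for 0 ≤ n < 64 (the only values fed to it inside Pre_)
def bin6 (n : Int) : List Char :=
  (List.range 6).map (fun k => if n / 2 ^ (5 - k) % 2 = 1 then '1' else '0')

-- hand port of the builtin int(s, 2): exact on nonempty strings of '0'/'1' digits (the only ones A feeds it)
def parseBin (s : List Char) : Int :=
  s.foldl (fun a c => a * 2 + (if c = '1' then 1 else 0)) 0

def extractRandomValue (string : String) : List Int :=
  let binary_values := string.toList.foldl (fun acc c => acc ++ [bin6 (pIdx c)]) ([] : List (List Char))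
  let binary_192 := binary_values.flatten
  let decimal_values := (PySem.List.pyRange 0 (binary_192.length : Int) 32).foldl
    (fun acc i => acc ++ [parseBin (PySem.List.slice binary_192 (some i) (some (i + 32)))]) ([] : List Int)
  decimal_values.reverse

-- ===== PORT B =====
def extractRandomValue_alt (string : String) : List Int :=
  let M := string.toList.foldl (fun m c => m * 64 + pIdx c) (0 : Int)
  let L : Int := 6 * (string.toList.length : Int)
  let result := (PySem.List.pyRange 0 L 32).foldl
    (fun acc i =>
      let width := min 32 (L - i)
      -- Python's M >> k is M / 2^k and '& ((1 << w) - 1)' is % 2^w: exact here since M ≥ 0 and k = L-i-width ≥ 0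
      acc ++ [(M / 2 ^ (L - i - width).toNat) % 2 ^ width.toNat]) ([] : List Int)
  result.reverse

-- ===== PRECONDITION & SPEC =====
-- Pre_ holds exactly when A returns: on any character outside PRINTABLE, A's PRINTABLE.index(c) raises ValueError.
def Pre_extractRandomValue (string : String) : Prop := (string.toList.all (fun c => PRINTABLE.toList.contains c)) = true
instance (string : String) : Decidable (Pre_extractRandomValue string) := by unfold Pre_extractRandomValue; infer_instance
def pvWitness_extractRandomValue : String := "HELLO"

def Spec_extractRandomValue (string : String) (out : List Int) : Prop := out = extractRandomValue_alt string
instance (string : String) (out : List Int) : Decidable (Spec_extractRandomValue string out) := by unfold Spec_extractRandomValue; infer_instance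

-- ===== CLAIM (what is proved, stated in full; the proofs are below) =====
def Claim_equal_extractRandomValue : Prop := ∀ (string : String), Dom_extractRandomValue string → Pre_extractRandomValue string → Spec_extractRandomValue string (extractRandomValue string)

-- ===== LEMMAS AND PROOFS =====

theorem pIdx_all : PRINTABLE.toList.all (fun c => decide (pIdx c < 64)) = true := by decide

theorem pIdx_lt (c : Char) (h : c ∈ PRINTABLE.toList) : pIdx c < 64 := by
  have := List.all_eq_true.mp pIdx_all c h
  simpa using this

theorem pIdx_nonneg (c : Char) : 0 ≤ pIdx c := Int.natCast_nonneg _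

-- peeling the leading digit of parseBin
theorem parse_cons (c : Char) (s : List Char) :
    parseBin (c :: s) = (if c = '1' then (1:Int) else 0) * 2 ^ s.length + parseBin s := by
  induction s using List.reverseRecOn with
  | nil => simp [parseBin]
  | append_singleton t d ih =>
    simp only [parseBin, List.foldl_append, List.foldl_cons, List.foldl_nil] at *
    rw [ih]
    simp only [List.length_append, List.length_cons, List.length_nil]
    ring

theorem parse_from (s : List Char) (a : Int) :
    s.foldl (fun a c => a * 2 + (if c = '1' then 1 else 0)) a
      = a * 2 ^ s.length + parseBin s := by
  induction s generalizing a with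
  | nil => simp [parseBin]
  | cons c t ih =>
    rw [List.foldl_cons, ih, parse_cons]
    simp only [List.length_cons]
    ring

theorem parse_append (a b : List Char) :
    parseBin (a ++ b) = parseBin a * 2 ^ b.length + parseBin b := by
  simp only [parseBin, List.foldl_append]
  exact parse_from b _

theorem parse_nonneg (s : List Char) : 0 ≤ parseBin s := by
  induction s with
  | nil => simp [parseBin]
  | cons c t ih =>
    rw [parse_cons]
    have : (0:Int) ≤ if c = '1' then 1 else 0 := by split <;> norm_num
    positivity

theorem parse_lt (s : List Char) : parseBin s < 2 ^ s.length := by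
  induction s with
  | nil => simp [parseBin]
  | cons c t ih =>
    rw [parse_cons]
    have hb : (if c = '1' then (1:Int) else 0) ≤ 1 := by split <;> norm_num
    have hp : (0:Int) < 2 ^ t.length := by positivity
    simp only [List.length_cons, pow_succ]
    nlinarith

theorem bin6_parse (n : Int) (h0 : 0 ≤ n) (h1 : n < 64) : parseBin (bin6 n) = n := by
  have key : ∀ m : Fin 64, parseBin (bin6 (m : Int)) = (m : Int) := by decide
  have := key ⟨n.toNat, by omega⟩
  simpa [Int.toNat_of_nonneg h0] using this

theorem bin6_length (n : Int) : (bin6 n).length = 6 := by simp [bin6]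

theorem flat_length (l : List Char) :
    ((l.map (fun c => bin6 (pIdx c))).flatten).length = 6 * l.length := by
  induction l with
  | nil => simp
  | cons c t ih => simp [ih, bin6_length]; omega

-- A's joined binary string, read as a number, is exactly B's accumulated integer M
theorem M_value (l : List Char) (h : ∀ c ∈ l, c ∈ PRINTABLE.toList) (a : Int) :
    l.foldl (fun m c => m * 64 + pIdx c) a
      = a * 2 ^ (6 * l.length) + parseBin ((l.map (fun c => bin6 (pIdx c))).flatten) := by
  induction l generalizing a with
  | nil => simp [parseBin]
  | cons c t ih =>
    have hc := h c (by simp)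
    have ht : ∀ x ∈ t, x ∈ PRINTABLE.toList := fun x hx => h x (by simp [hx])
    rw [List.foldl_cons, ih ht, List.map_cons, List.flatten_cons, parse_append,
      bin6_parse (pIdx c) (pIdx_nonneg c) (pIdx_lt c hc), flat_length]
    simp only [List.length_cons]
    have : (2:Int) ^ (6 * (t.length + 1)) = 2 ^ (6 * t.length) * 64 := by
      rw [Nat.mul_add, pow_add]; norm_num
    rw [this]
    ring

theorem take_min (k : Nat) (l : List Char) : l.take k = l.take (min k l.length) := by
  rcases le_total k l.length with h | h
  · rw [min_eq_left h]
  · rw [min_eq_right h, List.take_length, List.take_of_length_le h]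

-- a bit-string chunk, read as a number, is a shift-and-mask of the whole number
theorem chunk_eq (bs : List Char) (a w : Nat) (h : a + w ≤ bs.length) :
    parseBin ((bs.drop a).take w)
      = parseBin bs / 2 ^ (bs.length - a - w) % 2 ^ w := by
  have hd : bs = bs.take a ++ ((bs.drop a).take w ++ (bs.drop a).drop w) := by
    rw [List.take_append_drop, List.take_append_drop]
  have hlen1 : ((bs.drop a).take w).length = w := by
    rw [List.length_take, List.length_drop]; omega
  have hlen2 : ((bs.drop a).drop w).length = bs.length - a - w := by
    simp [List.length_drop]; omega
  set C := parseBin ((bs.drop a).take w) with hC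
  set R := parseBin ((bs.drop a).drop w) with hR
  set A' := parseBin (bs.take a) with hA
  have hval : parseBin bs = (A' * 2 ^ w + C) * 2 ^ (bs.length - a - w) + R := by
    conv_lhs => rw [hd]
    rw [parse_append, parse_append, List.length_append, hlen1, hlen2, pow_add]
    ring
  have hRpos := parse_nonneg ((bs.drop a).drop w)
  have hRlt := parse_lt ((bs.drop a).drop w)
  rw [hlen2] at hRlt
  have hCpos := parse_nonneg ((bs.drop a).take w)
  have hClt := parse_lt ((bs.drop a).take w)
  rw [hlen1] at hClt
  rw [hval, add_comm ((A' * 2 ^ w + C) * 2 ^ (bs.length - a - w)) R,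
    Int.add_mul_ediv_right _ _ (by positivity : (2:Int) ^ (bs.length - a - w) ≠ 0),
    Int.ediv_eq_zero_of_lt hRpos hRlt, zero_add, add_comm (A' * 2 ^ w) C,
    mul_comm A' ((2:Int) ^ w), Int.add_mul_emod_self_left,
    Int.emod_eq_of_lt hCpos hClt]

theorem extractRandomValue_eq_alt (s : String) (hpre : ∀ c ∈ s.toList, c ∈ PRINTABLE.toList) :
    extractRandomValue s = extractRandomValue_alt s := by
  have hM := M_value s.toList hpre 0
  rw [zero_mul, zero_add] at hM
  simp only [extractRandomValue, extractRandomValue_alt,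
    PySem.List.foldl_append_singleton_eq_map, List.nil_append, hM]
  set l := s.toList with hl
  set bits := (l.map (fun c => bin6 (pIdx c))).flatten with hbits
  have hlen : bits.length = 6 * l.length := flat_length l
  have hrange : ((bits.length : Nat) : Int) = 6 * (l.length : Int) := by
    rw [hlen]; push_cast; ring
  rw [hrange]
  apply congrArg
  apply List.map_congr_left
  intro i hi
  rw [PySem.List.mem_pyRange_iff_of_pos (by norm_num)] at hi
  obtain ⟨h0, h1, -⟩ := hi
  have h1' : i.toNat < bits.length := by omega
  rw [PySem.List.slice_toNat bits h0 (by omega)]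
  have e32 : (i + 32).toNat - i.toNat = 32 := by omega
  rw [e32, take_min 32 (bits.drop i.toNat), List.length_drop]
  have ew : (min 32 (6 * (l.length:Int) - i)).toNat = min 32 (bits.length - i.toNat) := by omega
  have er : (6 * (l.length:Int) - i - min 32 (6 * (l.length:Int) - i)).toNat
      = bits.length - i.toNat - min 32 (bits.length - i.toNat) := by omega
  rw [chunk_eq bits i.toNat (min 32 (bits.length - i.toNat)) (by omega), ew, er]

-- ===== VERDICT (by name: the statement is the Claim_ definition above) =====
theorem extractRandomValue_spec : Claim_equal_extractRandomValue := by
  intro s _ hpre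
  unfold Spec_extractRandomValue
  refine extractRandomValue_eq_alt s ?_
  rw [Pre_extractRandomValue] at hpre
  simpa [List.all_eq_true] using hpre
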